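-- pv_equiv track=rewrite | github.com/BlueBeret/wordngab | dataprocessing.py | checkExistingalphabet
-- ===== SOURCE A (Python) =====
-- from string import ascii_lowercase
--
-- def checkExistingalphabet(word):
--     count = 0
--     letters = []
--     for i in ascii_lowercase:
--         if i in word:
--             count += 1
--             letters.append(i)
--
--     return count, letters
-- ===== SOURCE B (Python) =====
-- from string import ascii_lowercase
--
-- def checkExistingalphabet(word):
--     # One pass over the word, dedup via a set, sort to recover alphabetical order.
--     seen = {c for c in word if c in ascii_lowercase}
--     letters = sorted(seen)
--     return len(letters), letters
-- ===== Notes on version B (the rewrite author's own statement) =====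
-- stated objective: idiomatic
-- what changed: B scans the word once collecting lowercase letters into a set and sorts it, instead of scanning the 26-letter alphabet and substring-testing each letter against the word.
import Mathlib
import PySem

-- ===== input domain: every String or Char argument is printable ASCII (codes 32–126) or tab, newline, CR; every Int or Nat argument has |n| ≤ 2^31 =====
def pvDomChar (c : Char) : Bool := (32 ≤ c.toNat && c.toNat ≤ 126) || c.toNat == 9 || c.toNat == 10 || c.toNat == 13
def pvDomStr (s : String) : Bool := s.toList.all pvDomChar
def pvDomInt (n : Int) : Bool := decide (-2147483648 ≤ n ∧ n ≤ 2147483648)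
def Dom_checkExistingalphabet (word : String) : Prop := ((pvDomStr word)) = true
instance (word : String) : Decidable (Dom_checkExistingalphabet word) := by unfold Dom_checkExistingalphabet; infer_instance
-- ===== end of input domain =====

-- B scans the word once collecting lowercase letters into a set, then sorts; A scans the alphabet testing membership in the word.

-- ===== PORT A =====
-- ascii_lowercase
def pvAlphabet : List Char := "abcdefghijklmnopqrstuvwxyz".toList

-- 'i in word' for a one-character i is exactly char membership in the word's characters (exact).
def checkExistingalphabet (word : String) : Int × List String :=
  let st := pvAlphabet.foldl
    (fun (st : Int × List String) i =>
      if word.toList.contains i then (st.1 + 1, st.2 ++ [String.mk [i]]) else st)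
    (0, [])
  st

-- ===== PORT B =====
def pvAsciiLowercase : List Char := "abcdefghijklmnopqrstuvwxyz".toList

def checkExistingalphabet_alt (word : String) : Int × List String :=
  let seen : PySem.Set Char := PySem.Set.ofList (word.toList.filter (fun c => pvAsciiLowercase.contains c))
  let letters := PySem.List.sorted seen (fun x => x) false
  ((letters.length : Int), letters.map (fun c => String.mk [c]))

-- ===== PRECONDITION & SPEC =====
def Spec_checkExistingalphabet (word : String) (out : Int × List String) : Prop := out = checkExistingalphabet_alt word
instance (word : String) (out : Int × List String) : Decidable (Spec_checkExistingalphabet word out) := by unfold Spec_checkExistingalphabet; infer_instance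

-- ===== CLAIM (what is proved, stated in full; the proofs are below) =====
def Claim_equal_checkExistingalphabet : Prop := ∀ (word : String), Dom_checkExistingalphabet word → Spec_checkExistingalphabet word (checkExistingalphabet word)

-- ===== LEMMAS AND PROOFS =====

-- A's loop, generalized over the accumulator.
theorem pvFoldA (w : List Char) (l : List Char) (n : Int) (acc : List String) :
    l.foldl (fun (st : Int × List String) i =>
      if w.contains i then (st.1 + 1, st.2 ++ [String.mk [i]]) else st) (n, acc)
    = (n + ((l.filter (fun c => w.contains c)).length : Int),
       acc ++ (l.filter (fun c => w.contains c)).map (fun c => String.mk [c])) := by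
  induction l generalizing n acc with
  | nil => simp
  | cons c t ih =>
    rw [List.foldl_cons, List.filter_cons]
    by_cases h : w.contains c = true
    · rw [if_pos h, if_pos h, ih, Prod.mk.injEq]
      refine ⟨by simp; ring, by simp⟩
    · rw [if_neg h, if_neg h, ih]

-- B's sorted set equals A's filtered alphabet.
theorem pvSortedEq (w : List Char) :
    PySem.List.sorted (PySem.Set.ofList (w.filter (fun c => pvAlphabet.contains c))) (fun x => x) false
    = pvAlphabet.filter (fun c => w.contains c) := by
  apply PySem.List.sorted_eq_of_perm_of_pairwise_lt
  · rw [List.perm_ext_iff_of_nodup]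
    · intro c
      simp [PySem.Set.mem_ofList, List.mem_filter]
      tauto
    · exact List.Nodup.filter _ (by decide)
    · exact PySem.Set.nodup_ofList _
  · exact List.Pairwise.filter _ (by decide)

-- ===== VERDICT (by name: the statement is the Claim_ definition above) =====
theorem checkExistingalphabet_spec : Claim_equal_checkExistingalphabet := by
  intro word _
  unfold Spec_checkExistingalphabet checkExistingalphabet checkExistingalphabet_alt
  simp only [pvFoldA, show pvAsciiLowercase = pvAlphabet from rfl, pvSortedEq]
  simp
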